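-- pv_equiv track=rewrite | github.com/Nikhil3405/RepoVerse | backend/services/vector_search.py | get_file_priority
-- ===== SOURCE A (Python) =====
-- IMPORTANT_KEYWORDS = [
--     # 🔥 Entry points
--     "main", "app", "index", "server", "run",
--
--     # 🔥 Backend core
--     "route", "routes", "controller", "controllers",
--     "service", "services", "api", "handler",
--
--     # 🔥 Architecture / logic
--     "core", "module", "manager", "engine", "logic",
--
--     # 🔥 Frontend (React / Next / etc.)
--     "page", "pages", "component", "components",
--     "layout", "view", "screen",
--
--     # 🔥 Config / setup
--     "config", "settings", "env",
--
--     # 🔥 ML / AI projects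
--     "model", "train", "inference", "pipeline",
--
--     # 🔥 Database / schema
--     "db", "database", "schema", "repository",
--
--     # 🔥 Auth / important features
--     "auth", "middleware",
--
--     # 🔥 CLI / scripts
--     "cli", "script"
-- ]
--
-- def get_file_priority(file_path: str):
--     path = file_path.lower()
--
--     if any(k in path for k in ["main", "app", "server", "index"]):
--         return 3  # highest priority
--
--     if any(k in path for k in ["route", "controller", "service", "api"]):
--         return 2
--
--     if any(k in path for k in IMPORTANT_KEYWORDS):
--         return 1
--
--     return 0
-- ===== SOURCE B (Python) =====
-- IMPORTANT_KEYWORDS = [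
--     "main", "app", "index", "server", "run",
--     "route", "routes", "controller", "controllers",
--     "service", "services", "api", "handler",
--     "core", "module", "manager", "engine", "logic",
--     "page", "pages", "component", "components",
--     "layout", "view", "screen",
--     "config", "settings", "env",
--     "model", "train", "inference", "pipeline",
--     "db", "database", "schema", "repository",
--     "auth", "middleware",
--     "cli", "script"
-- ]
--
-- # one keyword -> tier table; tier-2/3 keywords overwrite their tier-1 entry
-- _PRIORITY = {k: 1 for k in IMPORTANT_KEYWORDS}
-- for _k in ("route", "controller", "service", "api"):
--     _PRIORITY[_k] = 2
-- for _k in ("main", "app", "server", "index"):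
--     _PRIORITY[_k] = 3
--
--
-- def get_file_priority(file_path: str):
--     path = file_path.lower()
--     best = 0
--     for keyword, prio in _PRIORITY.items():
--         if keyword in path and prio > best:
--             best = prio
--     return best
-- ===== Notes on version B (the rewrite author's own statement) =====
-- stated objective: simpler
-- what changed: Replaces the three sequential any()-membership passes with one keyword->tier table built once at module level and a single running-maximum loop over it (max matching tier, default 0).
import Mathlib
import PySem

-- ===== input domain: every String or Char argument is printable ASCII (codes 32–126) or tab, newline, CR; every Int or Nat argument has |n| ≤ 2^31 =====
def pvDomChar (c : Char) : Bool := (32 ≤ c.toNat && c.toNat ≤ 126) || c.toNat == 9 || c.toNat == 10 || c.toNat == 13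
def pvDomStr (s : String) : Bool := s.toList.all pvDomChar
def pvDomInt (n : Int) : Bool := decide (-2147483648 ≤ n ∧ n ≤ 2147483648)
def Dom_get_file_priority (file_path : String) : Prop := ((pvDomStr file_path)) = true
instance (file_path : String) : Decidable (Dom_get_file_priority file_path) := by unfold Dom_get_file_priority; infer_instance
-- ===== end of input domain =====

-- B replaces A's three sequential any()-membership passes by one keyword→tier table
-- and a single running-maximum loop over it (objective: simpler).


-- ===== PORT A =====
def IMPORTANT_KEYWORDS : List String := [
  "main", "app", "index", "server", "run",
  "route", "routes", "controller", "controllers",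
  "service", "services", "api", "handler",
  "core", "module", "manager", "engine", "logic",
  "page", "pages", "component", "components",
  "layout", "view", "screen",
  "config", "settings", "env",
  "model", "train", "inference", "pipeline",
  "db", "database", "schema", "repository",
  "auth", "middleware",
  "cli", "script"]

def get_file_priority (file_path : String) : Int :=
  let path := PySem.Str.lower file_path
  if (["main", "app", "server", "index"] : List String).any (fun k => PySem.Str.isIn k path) then 3
  else if (["route", "controller", "service", "api"] : List String).any (fun k => PySem.Str.isIn k path) then 2
  else if IMPORTANT_KEYWORDS.any (fun k => PySem.Str.isIn k path) then 1
  else 0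

-- ===== PORT B =====
-- the module-level table: every IMPORTANT_KEYWORDS entry ↦ 1, then tier-2/3 keys overwritten
def pvPriority : PySem.Dict String Int :=
  let d := PySem.Dict.ofList (IMPORTANT_KEYWORDS.map (fun k => (k, (1 : Int))))
  let d := (["route", "controller", "service", "api"] : List String).foldl (fun d k => d.insert k (2 : Int)) d
  (["main", "app", "server", "index"] : List String).foldl (fun d k => d.insert k (3 : Int)) d

def get_file_priority_alt (file_path : String) : Int :=
  let path := PySem.Str.lower file_path
  pvPriority.items.foldl
    (fun best kp => if PySem.Str.isIn kp.1 path && decide (best < kp.2) then kp.2 else best) 0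

-- ===== PRECONDITION & SPEC =====
def Spec_get_file_priority (file_path : String) (out : Int) : Prop := out = get_file_priority_alt file_path
instance (file_path : String) (out : Int) : Decidable (Spec_get_file_priority file_path out) := by unfold Spec_get_file_priority; infer_instance

-- ===== CLAIM (what is proved, stated in full; the proofs are below) =====
def Claim_equal_get_file_priority : Prop := ∀ (file_path : String), Dom_get_file_priority file_path → Spec_get_file_priority file_path (get_file_priority file_path)

-- ===== LEMMAS AND PROOFS =====

-- B's running-maximum loop, with the conditional update rewritten as a max-fold
def pvG (m : String → Bool) (b : Int) (L : List (String × Int)) : Int :=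
  L.foldl (fun best kp => if m kp.1 then max best kp.2 else best) b

lemma pvFold_eq_pvG (m : String → Bool) (L : List (String × Int)) (b : Int) :
    L.foldl (fun best kp => if m kp.1 && decide (best < kp.2) then kp.2 else best) b = pvG m b L := by
  induction L generalizing b with
  | nil => rfl
  | cons kp tl ih =>
    simp only [List.foldl, pvG] at *
    rw [ih]
    congr 1
    by_cases hm : m kp.1 = true
    · by_cases hlt : b < kp.2 <;> simp [hm, hlt, max_def] <;> omega
    · simp [hm]

lemma le_pvG_self (m : String → Bool) (b : Int) (L : List (String × Int)) : b ≤ pvG m b L := by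
  induction L generalizing b with
  | nil => exact le_refl b
  | cons kp tl ih =>
    refine le_trans ?_ (ih (if m kp.1 then max b kp.2 else b))
    split
    · exact le_max_left _ _
    · exact le_refl b

lemma pvG_le (m : String → Bool) (b c : Int) (L : List (String × Int))
    (h1 : b ≤ c) (h2 : ∀ kp ∈ L, m kp.1 = true → kp.2 ≤ c) : pvG m b L ≤ c := by
  induction L generalizing b with
  | nil => exact h1
  | cons kp tl ih =>
    refine ih (if m kp.1 then max b kp.2 else b) ?_ (fun x hx hm => h2 x (List.mem_cons_of_mem _ hx) hm)
    split
    · next h => exact max_le h1 (h2 kp (List.mem_cons_self) h)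
    · exact h1

lemma le_pvG_of_mem (m : String → Bool) (b : Int) (L : List (String × Int))
    (kp : String × Int) (hmem : kp ∈ L) (hm : m kp.1 = true) : kp.2 ≤ pvG m b L := by
  induction L generalizing b with
  | nil => cases hmem
  | cons hd tl ih =>
    rcases List.mem_cons.mp hmem with h | h
    · subst h
      refine le_trans ?_ (le_pvG_self m _ tl)
      simp only [hm, if_pos]
      exact le_max_right _ _
    · exact ih _ h

-- the table's item list, evaluated once to a literal (kernel-checked by rfl)
def pvItemsL : List (String × Int) := [("main", 3), ("app", 3), ("index", 3), ("server", 3), ("run", 1), ("route", 2), ("routes", 1), ("controller", 2), ("controllers", 1), ("service", 2), ("services", 1), ("api", 2), ("handler", 1), ("core", 1), ("module", 1), ("manager", 1), ("engine", 1), ("logic", 1), ("page", 1), ("pages", 1), ("component", 1), ("components", 1), ("layout", 1), ("view", 1), ("screen", 1), ("config", 1), ("settings", 1), ("env", 1), ("model", 1), ("train", 1), ("inference", 1), ("pipeline", 1), ("db", 1), ("database", 1), ("schema", 1), ("repository", 1), ("auth", 1), ("middleware", 1), ("cli", 1), ("script", 1)]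

set_option maxRecDepth 100000 in
lemma pv_items_eq : pvPriority.items = pvItemsL := by rfl

lemma pv_items_le_three : ∀ kp ∈ pvItemsL, kp.2 ≤ 3 := by decide
lemma pv_items_ge_one : ∀ kp ∈ pvItemsL, 1 ≤ kp.2 := by decide
lemma pv_t3_mem : ∀ k ∈ (["main", "app", "server", "index"] : List String), (k, (3 : Int)) ∈ pvItemsL := by decide
lemma pv_t2_mem : ∀ k ∈ (["route", "controller", "service", "api"] : List String), (k, (2 : Int)) ∈ pvItemsL := by decide
lemma pv_imp_mem : ∀ k ∈ IMPORTANT_KEYWORDS,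
    (k, (1 : Int)) ∈ pvItemsL ∨ (k, (2 : Int)) ∈ pvItemsL ∨ (k, (3 : Int)) ∈ pvItemsL := by decide
lemma pv_items_three_key : ∀ kp ∈ pvItemsL, kp.2 = 3 → kp.1 ∈ (["main", "app", "server", "index"] : List String) := by decide
lemma pv_items_two_key : ∀ kp ∈ pvItemsL, kp.2 = 2 → kp.1 ∈ (["route", "controller", "service", "api"] : List String) := by decide
lemma pv_items_key_imp : ∀ kp ∈ pvItemsL, kp.1 ∈ IMPORTANT_KEYWORDS := by decide

lemma pv_key (m : String → Bool) :
    (if (["main", "app", "server", "index"] : List String).any m = true then (3 : Int)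
     else if (["route", "controller", "service", "api"] : List String).any m = true then 2
     else if IMPORTANT_KEYWORDS.any m = true then 1
     else 0) = pvG m 0 pvItemsL := by
  by_cases h3 : (["main", "app", "server", "index"] : List String).any m = true
  · simp only [h3, if_true]
    rcases List.any_eq_true.mp h3 with ⟨k, hk, hmk⟩
    refine (le_antisymm ?_ ?_).symm
    · exact pvG_le m 0 3 _ (by omega) (fun kp hkp _ => pv_items_le_three kp hkp)
    · exact le_pvG_of_mem m 0 _ (k, 3) (pv_t3_mem k hk) hmk
  · by_cases h2 : (["route", "controller", "service", "api"] : List String).any m = true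
    · simp only [h3, h2, Bool.false_eq_true, if_true, if_false]
      rcases List.any_eq_true.mp h2 with ⟨k, hk, hmk⟩
      refine (le_antisymm ?_ ?_).symm
      · refine pvG_le m 0 2 _ (by omega) (fun kp hkp hmkp => ?_)
        rcases lt_or_eq_of_le (pv_items_le_three kp hkp) with h | h
        · omega
        · exact absurd (List.any_eq_true.mpr ⟨kp.1, pv_items_three_key kp hkp h, hmkp⟩) h3
      · exact le_pvG_of_mem m 0 _ (k, 2) (pv_t2_mem k hk) hmk
    · by_cases h1 : IMPORTANT_KEYWORDS.any m = true
      · simp only [h3, h2, h1, Bool.false_eq_true, if_true, if_false]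
        rcases List.any_eq_true.mp h1 with ⟨k, hk, hmk⟩
        refine (le_antisymm ?_ ?_).symm
        · refine pvG_le m 0 1 _ (by omega) (fun kp hkp hmkp => ?_)
          have hle3 := pv_items_le_three kp hkp
          have hge1 := pv_items_ge_one kp hkp
          by_cases he2 : kp.2 = 2
          · exact absurd (List.any_eq_true.mpr ⟨kp.1, pv_items_two_key kp hkp he2, hmkp⟩) h2
          · by_cases he3 : kp.2 = 3
            · exact absurd (List.any_eq_true.mpr ⟨kp.1, pv_items_three_key kp hkp he3, hmkp⟩) h3
            · omega
        · rcases pv_imp_mem k hk with h | h | h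
          · exact le_pvG_of_mem m 0 _ (k, 1) h hmk
          · exact le_trans (by omega) (le_pvG_of_mem m 0 _ (k, 2) h hmk)
          · exact le_trans (by omega) (le_pvG_of_mem m 0 _ (k, 3) h hmk)
      · simp only [h3, h2, h1, Bool.false_eq_true, if_false]
        refine le_antisymm (le_pvG_self m 0 _) ?_
        refine pvG_le m 0 0 _ (by omega) (fun kp hkp hmkp => ?_)
        exact absurd (List.any_eq_true.mpr ⟨kp.1, pv_items_key_imp kp hkp, hmkp⟩) h1

-- ===== VERDICT (by name: the statement is the Claim_ definition above) =====
theorem get_file_priority_spec : Claim_equal_get_file_priority := by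
  intro file_path _
  simp only [Spec_get_file_priority, get_file_priority, get_file_priority_alt]
  rw [pvFold_eq_pvG (fun k => PySem.Str.isIn k (PySem.Str.lower file_path)), pv_items_eq]
  exact pv_key (fun k => PySem.Str.isIn k (PySem.Str.lower file_path))
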